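-- pv_equiv track=rewrite | github.com/latentcat/ReCode | recode_plus/planner.py | _split_blocks
-- ===== SOURCE A (Python) =====
-- def _split_blocks(code: str) -> list[str]:
--     """将代码拆分为语句块"""
--     # 简单实现：按空行分割
--     blocks = []
--     current_block = []
--
--     for line in code.split('\n'):
--         stripped = line.strip()
--
--         # 跳过空行和注释
--         if not stripped or stripped.startswith('#'):
--             if current_block:
--                 blocks.append('\n'.join(current_block))
--                 current_block = []
--             continue
--
--         current_block.append(line)
--
--     if current_block:
--         blocks.append('\n'.join(current_block))
--
--     return blocks
-- ===== SOURCE B (Python) =====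
-- def _is_sep(line):
--     s = line.strip()
--     return not s or s.startswith('#')
--
--
-- def _split_blocks(code: str) -> list[str]:
--     blocks = []
--     rest = code.split('\n')
--     rest.reverse()          # consume from the end: pop() is O(1)
--     while rest:
--         if _is_sep(rest[-1]):
--             rest.pop()
--         else:
--             block = []
--             while rest and not _is_sep(rest[-1]):
--                 block.append(rest.pop())
--             blocks.append('\n'.join(block))
--     return blocks
-- ===== Notes on version B (the rewrite author's own statement) =====
-- stated objective: alternative
-- what changed: A threads a pending current_block through one flush-on-separator pass with a final flush; B treats the line list as a stack (reverse + O(1) pops) and emits each maximal run of non-separator lines with a nested collection loop, so no pending block or end-of-loop flush exists.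
import Mathlib
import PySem

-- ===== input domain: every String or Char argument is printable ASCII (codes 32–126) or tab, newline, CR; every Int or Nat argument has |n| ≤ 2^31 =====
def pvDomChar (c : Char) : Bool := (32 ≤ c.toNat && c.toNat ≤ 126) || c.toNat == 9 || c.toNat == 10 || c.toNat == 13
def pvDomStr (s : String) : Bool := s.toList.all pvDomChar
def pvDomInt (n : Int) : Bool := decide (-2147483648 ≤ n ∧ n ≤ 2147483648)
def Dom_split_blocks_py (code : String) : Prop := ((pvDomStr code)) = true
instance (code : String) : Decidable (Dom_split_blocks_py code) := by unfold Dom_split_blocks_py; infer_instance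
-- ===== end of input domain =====

-- B replaces A's flush-on-separator accumulator pass by a stack-style scan that pops each
-- maximal run of non-separator lines with a nested loop (alternative decomposition, same cost).


-- ===== PORT A =====
-- loop body of A: state = (blocks, current_block)
def pvStepA (st : List String × List String) (line : String) : List String × List String :=
  let stripped := PySem.Str.strip line
  if stripped == "" || PySem.Str.startswith stripped "#" then
    if st.2 ≠ [] then (st.1 ++ [PySem.Str.join "\n" st.2], []) else st
  else
    (st.1, st.2 ++ [line])

-- the final flush after A's loop
def pvFinA (st : List String × List String) : List String :=
  if st.2 ≠ [] then st.1 ++ [PySem.Str.join "\n" st.2] else st.1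

-- code.split('\n'): split? is `some` whenever the separator is nonempty, so getD never fires
def split_blocks_py (code : String) : List String :=
  pvFinA (((PySem.Str.split? code "\n").getD []).foldl pvStepA ([], []))

-- ===== PORT B =====
def pvIsSep (line : String) : Bool :=
  let s := PySem.Str.strip line
  s == "" || PySem.Str.startswith s "#"

-- inner while loop of B: pops the run of non-separator lines into block.
-- Source B reverses the list and pops from the END; the port consumes the SAME lines in the SAME
-- order from the head of the original-order list (rest[-1] of the reversed list = head here).
def pvCollect (block : List String) (rest : List String) : List String × List String :=
  match rest with
  | [] => (block, [])
  | l :: ls => if pvIsSep l then (block, l :: ls) else pvCollect (block ++ [l]) ls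

theorem pvCollect_snd_length_le (block rest : List String) :
    (pvCollect block rest).2.length ≤ rest.length := by
  induction rest generalizing block with
  | nil => simp [pvCollect]
  | cons l ls ih =>
    simp only [pvCollect]
    split
    · simp
    · exact le_trans (ih _) (Nat.le_succ _)

-- outer while loop of B
def pvLoopB (blocks : List String) (rest : List String) : List String :=
  match rest with
  | [] => blocks
  | l :: ls =>
    if pvIsSep l then pvLoopB blocks ls
    else
      pvLoopB (blocks ++ [PySem.Str.join "\n" (pvCollect [] (l :: ls)).1])
        (pvCollect [] (l :: ls)).2
termination_by rest.length
decreasing_by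
  · simp
  · have h2 := pvCollect_snd_length_le [l] ls
    simp only [pvCollect]
    rw [if_neg (by simp_all)]
    simp only [List.nil_append, List.length_cons]
    omega

def split_blocks_py_alt (code : String) : List String :=
  pvLoopB [] ((PySem.Str.split? code "\n").getD [])

-- ===== PRECONDITION & SPEC =====
def Spec_split_blocks_py (code : String) (out : List String) : Prop := out = split_blocks_py_alt code
instance (code : String) (out : List String) : Decidable (Spec_split_blocks_py code out) := by unfold Spec_split_blocks_py; infer_instance

-- ===== CLAIM (what is proved, stated in full; the proofs are below) =====
def Claim_equal_split_blocks_py : Prop := ∀ (code : String), Dom_split_blocks_py code → Spec_split_blocks_py code (split_blocks_py code)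

-- ===== LEMMAS AND PROOFS =====

-- A's inline separator test is exactly pvIsSep
theorem pvStepA_eq (st : List String × List String) (l : String) :
    pvStepA st l =
      if pvIsSep l = true then
        (if st.2 ≠ [] then (st.1 ++ [PySem.Str.join "\n" st.2], []) else st)
      else (st.1, st.2 ++ [l]) := rfl

theorem pvStepA_shift (b c : List String) (l : String) :
    pvStepA (b, c) l = (b ++ (pvStepA ([], c) l).1, (pvStepA ([], c) l).2) := by
  simp only [pvStepA_eq]
  split_ifs <;> simp_all

-- the blocks accumulated so far are a passive prefix of A's result
theorem pvFinA_foldl_shift (lines : List String) :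
    ∀ b c : List String,
      pvFinA (lines.foldl pvStepA (b, c)) = b ++ pvFinA (lines.foldl pvStepA ([], c)) := by
  induction lines with
  | nil => intro b c; by_cases h : c = [] <;> simp [pvFinA, h]
  | cons l ls ih =>
    intro b c
    simp only [List.foldl_cons, pvStepA_shift b c l]
    rw [ih, ih (pvStepA ([], c) l).1]
    simp [List.append_assoc]

-- B's inner loop takes the non-separator prefix and leaves the rest
theorem pvCollect_eq (ls : List String) :
    ∀ b : List String,
      pvCollect b ls = (b ++ ls.takeWhile (fun l => !pvIsSep l),
                        ls.dropWhile (fun l => !pvIsSep l)) := by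
  induction ls with
  | nil => intro b; simp [pvCollect]
  | cons l ls ih =>
    intro b
    cases h : pvIsSep l <;>
      simp [pvCollect, h, ih]

-- B's already-emitted blocks are a passive prefix of its result
theorem pvLoopB_nil (b : List String) : pvLoopB b [] = b := by
  rw [pvLoopB]

theorem pvLoopB_cons (b : List String) (l : String) (ls : List String) :
    pvLoopB b (l :: ls) =
      if pvIsSep l then pvLoopB b ls
      else pvLoopB (b ++ [PySem.Str.join "\n" (pvCollect [] (l :: ls)).1])
        (pvCollect [] (l :: ls)).2 := by
  rw [pvLoopB]

theorem pvLoopB_shift (n : Nat) :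
    ∀ rest : List String, rest.length ≤ n →
      ∀ b : List String, pvLoopB b rest = b ++ pvLoopB [] rest := by
  induction n with
  | zero =>
    intro rest h b
    rw [List.length_eq_zero_iff.mp (Nat.le_zero.mp h)]
    rw [pvLoopB_nil, pvLoopB_nil]; simp
  | succ n ih =>
    intro rest h b
    match rest with
    | [] => rw [pvLoopB_nil, pvLoopB_nil]; simp
    | l :: ls =>
      simp only [List.length_cons, Nat.succ_le_succ_iff] at h
      cases hsep : pvIsSep l with
      | true =>
        rw [pvLoopB_cons, pvLoopB_cons, if_pos hsep, if_pos hsep]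
        exact ih ls h b
      | false =>
        have hns : ¬ pvIsSep l = true := by simp [hsep]
        have hlen : (pvCollect [] (l :: ls)).2.length ≤ n := by
          rw [pvCollect_eq]
          simp [hsep]
          exact le_trans (List.length_dropWhile_le _ ls) h
        rw [pvLoopB_cons, pvLoopB_cons, if_neg hns, if_neg hns, ih _ hlen]
        conv_rhs => rw [ih _ hlen]
        simp [List.append_assoc]

-- A's loop started with a nonempty pending block: it joins the non-separator run onto it
theorem pvFoldA_pending (lines : List String) :
    ∀ c : List String, c ≠ [] →
      pvFinA (lines.foldl pvStepA ([], c)) =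
        PySem.Str.join "\n" (c ++ lines.takeWhile (fun l => !pvIsSep l)) ::
          pvFinA ((lines.dropWhile (fun l => !pvIsSep l)).foldl pvStepA ([], [])) := by
  induction lines with
  | nil => intro c hc; simp [pvFinA, hc]
  | cons l ls ih =>
    intro c hc
    cases hsep : pvIsSep l with
    | false =>
      have hstep : pvStepA ([], c) l = ([], c ++ [l]) := by
        rw [pvStepA_eq]; simp [hsep]
      simp only [List.foldl_cons, hstep, List.takeWhile_cons, List.dropWhile_cons, hsep,
        Bool.not_false, if_pos]
      rw [ih (c ++ [l]) (by simp)]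
      simp [List.append_assoc]
    | true =>
      have hstep : pvStepA ([], c) l = ([PySem.Str.join "\n" c], []) := by
        rw [pvStepA_eq]; simp [hsep, hc]
      have hstep0 : pvStepA ([], []) l = ([], []) := by
        rw [pvStepA_eq]; simp [hsep]
      rw [List.foldl_cons, hstep, pvFinA_foldl_shift]
      simp [hsep, hstep0]

theorem pv_mainN (n : Nat) :
    ∀ lines : List String, lines.length ≤ n →
      pvFinA (lines.foldl pvStepA ([], [])) = pvLoopB [] lines := by
  induction n with
  | zero =>
    intro lines h
    rw [List.length_eq_zero_iff.mp (Nat.le_zero.mp h)]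
    rw [pvLoopB_nil]; simp [pvFinA]
  | succ n ih =>
    intro lines h
    match lines with
    | [] => rw [pvLoopB_nil]; simp [pvFinA]
    | l :: ls =>
      simp only [List.length_cons, Nat.succ_le_succ_iff] at h
      cases hsep : pvIsSep l with
      | true =>
        have hstep0 : pvStepA ([], []) l = ([], []) := by
          rw [pvStepA_eq]; simp [hsep]
        rw [List.foldl_cons, hstep0, pvLoopB, if_pos hsep, ih ls h]
      | false =>
        have hstep : pvStepA ([], []) l = ([], [l]) := by
          rw [pvStepA_eq]; simp [hsep]
        have hcol : pvCollect [] (l :: ls) =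
            (l :: ls.takeWhile (fun x => !pvIsSep x), ls.dropWhile (fun x => !pvIsSep x)) := by
          rw [pvCollect_eq]
          simp [hsep]
        have hlen : (ls.dropWhile (fun x => !pvIsSep x)).length ≤ n :=
          le_trans (List.length_dropWhile_le _ _) h
        have hns : ¬ pvIsSep l = true := by simp [hsep]
        rw [List.foldl_cons, hstep, pvFoldA_pending ls [l] (by simp),
          pvLoopB_cons, if_neg hns, hcol]
        dsimp only
        rw [ih _ hlen]
        conv_rhs => rw [pvLoopB_shift n _ hlen]
        simp

theorem pv_main (lines : List String) :
    pvFinA (lines.foldl pvStepA ([], [])) = pvLoopB [] lines :=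
  pv_mainN lines.length lines le_rfl

-- ===== VERDICT (by name: the statement is the Claim_ definition above) =====
theorem split_blocks_py_spec : Claim_equal_split_blocks_py := by
  intro code _
  unfold Spec_split_blocks_py split_blocks_py split_blocks_py_alt
  exact pv_main _
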